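-- pv_equiv track=rewrite | github.com/taryodor/Vyzva | hlavni.py | retezeni_letu_v2
-- ===== SOURCE A (Python) =====
-- def retezeni_letu_v2(seznam_dvojic):
--     pojistka = []
--     pomocny_seznam = []
--     for pivotni_radek in range(len(seznam_dvojic)):
--     #otestuji kazdy radek
--         for testovany_radek in range(len(seznam_dvojic)):
--         #otestuji kazdy clen v pivotnim radku
--             if pivotni_radek == testovany_radek:
--             #netestuji stejny radek proti sobe
--                 continue
--             for testovany_index in range(len(seznam_dvojic[testovany_radek])):
--             #testuji na kazdem jinem radku kazdy clen an to, jestli je stejny s poslednim clenem pivotniho radku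
--                 if seznam_dvojic[pivotni_radek][-1] == seznam_dvojic[testovany_radek][testovany_index] and testovany_index < len(seznam_dvojic[testovany_radek])-1:
--                 #Musim overit, ze kyzeny clen v testovanem radku neni na konci...
--                     pojistka.append(list.copy(seznam_dvojic[pivotni_radek]))
--                     pojistka[-1].append(seznam_dvojic[testovany_radek][testovany_index+1])
--                     #Sem a na odpovidajici misto dole staci pridat cyklus, ktery pridava vsechny nasledujici cleny, ale uz jdu spat. Doubrou
--                     #Toto jiz neni potreba, dokonce to s touto verzi kodu neni mozne, nebo to spis ja neumim
--                     #Vyreseno vhodne cyklenym volanim funkce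
--                     #Vtip je ten, ze ja vzdy pridam jen jedno cislo od hledaneho cisla vpravo
--                     #Coz neni na skodu, ale to jsem si predtim nemyslel
--                     if pojistka[-1] in seznam_dvojic:
--                         continue
--                     #Pojistka proti duplovani zapisu
--                     pomocny_seznam.append(list.copy(seznam_dvojic[pivotni_radek]))
--                     pomocny_seznam[-1].append(seznam_dvojic[testovany_radek][testovany_index+1])
--                     #samotne zapsani a vraceni nove nalezene kombinace
--                     return pomocny_seznam[-1]
-- ===== SOURCE B (Python) =====
-- def retezeni_letu_v2(seznam_dvojic):
--     existing = set(map(tuple, seznam_dvojic))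
--     occs = [(row[j], r, row[j + 1])
--             for r, row in enumerate(seznam_dvojic)
--             for j in range(len(row) - 1)]
--     occ = {}
--     for v, r, nxt in occs:
--         occ.setdefault(v, []).append((r, nxt))
--     for i, row in enumerate(seznam_dvojic):
--         for r, nxt in occ.get(row[-1], []):
--             if r != i:
--                 cand = row + [nxt]
--                 if tuple(cand) not in existing:
--                     return cand
--     return None
-- ===== Notes on version B (the rewrite author's own statement) =====
-- stated objective: alternative
-- what changed: Replaces A's triple nested scan with per-candidate list-membership tests by a precomputed value->(row,successor) occurrence index plus a set of existing tuples, iterating each pivot's matching occurrences in the same (row,index) order.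
-- outside the precondition, e.g. on retezeni_letu_v2([[]]): A returns None, B raises IndexError; on retezeni_letu_v2([[1, 2], [2, 3], []]): A returns [1, 2, 3], B returns [1, 2, 3]
import Mathlib
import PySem

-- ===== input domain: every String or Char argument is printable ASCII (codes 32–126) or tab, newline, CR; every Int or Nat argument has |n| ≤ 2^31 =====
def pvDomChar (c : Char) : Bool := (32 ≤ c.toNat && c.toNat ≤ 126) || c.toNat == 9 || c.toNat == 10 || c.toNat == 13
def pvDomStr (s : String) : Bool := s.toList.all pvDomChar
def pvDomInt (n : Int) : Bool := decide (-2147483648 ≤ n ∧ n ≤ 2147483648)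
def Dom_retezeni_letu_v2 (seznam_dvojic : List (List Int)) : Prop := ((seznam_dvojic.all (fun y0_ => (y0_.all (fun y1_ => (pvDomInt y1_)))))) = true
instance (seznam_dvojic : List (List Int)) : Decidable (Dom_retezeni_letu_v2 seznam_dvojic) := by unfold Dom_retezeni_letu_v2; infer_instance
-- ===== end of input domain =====

-- B replaces A's triple nested scan (with an O(n·m) list-membership test per candidate) by a
-- precomputed value→(row,successor) occurrence index plus a set of the existing rows; same result.

-- ===== PORT A =====
-- inner loop over 'testovany_index' of one tested row; index accesses are in range on every
-- executed iteration when the pivot row is nonempty (Pre_), so pyGetD is exact there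
def pvAInner (xs : List (List Int)) (pivot trow : List Int) : List Int → Option (List Int)
  | [] => none
  | ti :: rest =>
    if PySem.List.pyGetD pivot (-1) 0 = PySem.List.pyGetD trow ti 0 ∧ ti < (trow.length : Int) - 1 then
      let cand := pivot ++ [PySem.List.pyGetD trow (ti + 1) 0]
      if cand ∈ xs then pvAInner xs pivot trow rest
      else some cand
    else pvAInner xs pivot trow rest

-- middle loop over 'testovany_radek'
def pvAMid (xs : List (List Int)) (pivot : List Int) (pi_ : Int) : List Int → Option (List Int)
  | [] => none
  | tr :: rest =>
    if pi_ = tr then pvAMid xs pivot pi_ rest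
    else
      match pvAInner xs pivot (PySem.List.pyGetD xs tr [])
          (PySem.List.pyRange 0 ((PySem.List.pyGetD xs tr []).length : Int) 1) with
      | some c => some c
      | none => pvAMid xs pivot pi_ rest

-- outer loop over 'pivotni_radek'
def pvAOuter (xs : List (List Int)) : List Int → Option (List Int)
  | [] => none
  | pi_ :: rest =>
    match pvAMid xs (PySem.List.pyGetD xs pi_ []) pi_ (PySem.List.pyRange 0 (xs.length : Int) 1) with
    | some c => some c
    | none => pvAOuter xs rest

def retezeni_letu_v2 (seznam_dvojic : List (List Int)) : Option (List Int) :=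
  pvAOuter seznam_dvojic (PySem.List.pyRange 0 (seznam_dvojic.length : Int) 1)

-- ===== PORT B =====
-- occs: the flat list [(row[j], r, row[j+1])] in (row, index) order; indices are in range, pyGetD exact
def pvBOccs (xs : List (List Int)) : List (Int × Int × Int) :=
  (PySem.List.enumerate xs 0).flatMap (fun p =>
    (PySem.List.pyRange 0 ((p.2.length : Int) - 1) 1).map (fun j =>
      (PySem.List.pyGetD p.2 j 0, p.1, PySem.List.pyGetD p.2 (j + 1) 0)))

-- occ: dict value -> list of (row, successor), built with setdefault/append
def pvBIndex (xs : List (List Int)) : PySem.Dict Int (List (Int × Int)) :=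
  (pvBOccs xs).foldl (fun d t => d.modify t.1 [] (· ++ [t.2])) PySem.Dict.empty

-- scan of one pivot's occurrence list
def pvBSearch (existing : PySem.Set (List Int)) (row : List Int) (i : Int) : List (Int × Int) → Option (List Int)
  | [] => none
  | (r, nxt) :: rest =>
    if r ≠ i then
      let cand := row ++ [nxt]
      if PySem.Set.contains existing cand then pvBSearch existing row i rest
      else some cand
    else pvBSearch existing row i rest

-- outer loop over enumerate(seznam_dvojic); row[-1] raises (none) on an empty row
def pvBOuter (existing : PySem.Set (List Int)) (occ : PySem.Dict Int (List (Int × Int))) :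
    List (Int × List Int) → Option (List Int)
  | [] => none
  | (i, row) :: rest =>
    match PySem.List.pyGet? row (-1) with
    | none => none
    | some last =>
      match pvBSearch existing row i (occ.getD last []) with
      | some c => some c
      | none => pvBOuter existing occ rest

def retezeni_letu_v2_alt (seznam_dvojic : List (List Int)) : Option (List Int) :=
  pvBOuter (PySem.Set.ofList seznam_dvojic) (pvBIndex seznam_dvojic)
    (PySem.List.enumerate seznam_dvojic 0)

-- ===== PRECONDITION & SPEC =====
-- Pre_ excludes inputs containing an empty row: there Python A raises IndexError on row[-1]
-- (except when an earlier pivot already returned, or the empty row is never compared — those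
-- returns are accidents of scan order and B raises on some of them; see claim cites).
def Pre_retezeni_letu_v2 (seznam_dvojic : List (List Int)) : Prop :=
  ∀ row ∈ seznam_dvojic, row ≠ []
instance (seznam_dvojic : List (List Int)) : Decidable (Pre_retezeni_letu_v2 seznam_dvojic) := by
  unfold Pre_retezeni_letu_v2; infer_instance

def pvWitness_retezeni_letu_v2 : List (List Int) := [[1, 2], [2, 3]]

def Spec_retezeni_letu_v2 (seznam_dvojic : List (List Int)) (out : Option (List Int)) : Prop := out = retezeni_letu_v2_alt seznam_dvojic
instance (seznam_dvojic : List (List Int)) (out : Option (List Int)) : Decidable (Spec_retezeni_letu_v2 seznam_dvojic out) := by unfold Spec_retezeni_letu_v2; infer_instance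

-- ===== CLAIM (what is proved, stated in full; the proofs are below) =====
def Claim_equal_retezeni_letu_v2 : Prop := ∀ (seznam_dvojic : List (List Int)), Dom_retezeni_letu_v2 seznam_dvojic → Pre_retezeni_letu_v2 seznam_dvojic → Spec_retezeni_letu_v2 seznam_dvojic (retezeni_letu_v2 seznam_dvojic)

-- ===== LEMMAS AND PROOFS =====

-- the occurrence triples contributed by one row
def pvRowOccs (r : Int) (row : List Int) : List (Int × Int × Int) :=
  (PySem.List.pyRange 0 ((row.length : Int) - 1) 1).map (fun j =>
    (PySem.List.pyGetD row j 0, r, PySem.List.pyGetD row (j + 1) 0))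

lemma pvBSearch_append (e : PySem.Set (List Int)) (row : List Int) (i : Int) (l1 l2 : List (Int × Int)) :
    pvBSearch e row i (l1 ++ l2) =
      match pvBSearch e row i l1 with
      | some c => some c
      | none => pvBSearch e row i l2 := by
  induction l1 with
  | nil => simp [pvBSearch]
  | cons p rest ih =>
    obtain ⟨r, nxt⟩ := p
    by_cases hr : r ≠ i
    · simp only [pvBSearch, List.cons_append, if_pos hr]
      split
      · exact ih
      · rfl
    · simp only [pvBSearch, List.cons_append, if_neg hr]
      exact ih

lemma pvBSearch_skip (e : PySem.Set (List Int)) (row : List Int) (i : Int)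
    (l : List (Int × Int)) (h : ∀ p ∈ l, p.1 = i) : pvBSearch e row i l = none := by
  induction l with
  | nil => rfl
  | cons p rest ih =>
    obtain ⟨r, nxt⟩ := p
    have : r = i := h (r, nxt) (by simp)
    simp [pvBSearch, this, ih (fun q hq => h q (by simp [hq]))]

lemma pvInner_eq (xs : List (List Int)) (pivot trow : List Int) (i r last : Int)
    (hlast : PySem.List.pyGetD pivot (-1) 0 = last) (hr : r ≠ i) :
    ∀ (d : Nat) (a : Int), 0 ≤ a → d = ((trow.length : Int) - a).toNat →
    pvAInner xs pivot trow (PySem.List.pyRange a (trow.length : Int) 1) =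
      pvBSearch (PySem.Set.ofList xs) pivot i
        ((((PySem.List.pyRange a ((trow.length : Int) - 1) 1).map (fun j =>
            (PySem.List.pyGetD trow j 0, r, PySem.List.pyGetD trow (j + 1) 0))).filter
            (fun t => t.1 == last)).map (fun t => t.2)) := by
  intro d
  induction d with
  | zero =>
    intro a ha hd
    rw [PySem.List.pyRange_one_eq_nil (by omega), PySem.List.pyRange_one_eq_nil (by omega)]
    simp [pvAInner, pvBSearch]
  | succ d ih =>
    intro a ha hd
    have hlt : a < (trow.length : Int) := by omega
    rw [PySem.List.pyRange_one_cons hlt]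
    by_cases h2 : a < (trow.length : Int) - 1
    · rw [PySem.List.pyRange_one_cons h2]
      by_cases hk : PySem.List.pyGetD trow a 0 = last
      · simp only [pvAInner, hlast, hk, h2, and_true, List.map_cons,
          List.filter_cons, beq_self_eq_true, if_pos]
        simp only [pvBSearch, hr, ne_eq, not_false_iff, if_pos,
          PySem.Set.contains_eq_listContains]
        by_cases hm : pivot ++ [PySem.List.pyGetD trow (a + 1) 0] ∈ xs
        · simp only [hm, List.contains_iff_mem, PySem.Set.mem_ofList, if_pos]
          exact ih (a + 1) (by omega) (by omega)
        · simp [PySem.Set.mem_ofList, hm]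
      · have hcond : ¬ (PySem.List.pyGetD pivot (-1) 0 = PySem.List.pyGetD trow a 0 ∧
            a < (trow.length : Int) - 1) := by
          intro hc; exact hk (by rw [← hc.1, hlast])
        simp only [pvAInner, if_neg hcond, List.map_cons, List.filter_cons]
        rw [if_neg (by simpa using hk)]
        exact ih (a + 1) (by omega) (by omega)
    · have hcond : ¬ (PySem.List.pyGetD pivot (-1) 0 = PySem.List.pyGetD trow a 0 ∧
          a < (trow.length : Int) - 1) := fun hc => h2 hc.2
      simp only [pvAInner, if_neg hcond]
      rw [PySem.List.pyRange_one_eq_nil (by omega : (trow.length : Int) - 1 ≤ a)]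
      have := ih (a + 1) (by omega) (by omega)
      rw [PySem.List.pyRange_one_eq_nil (by omega : (trow.length : Int) - 1 ≤ a + 1)] at this
      simpa using this

lemma pvMid_eq (xs : List (List Int)) (pivot : List Int) (i last : Int)
    (hlast : PySem.List.pyGetD pivot (-1) 0 = last) :
    ∀ (d : Nat) (b : Int), 0 ≤ b → d = ((xs.length : Int) - b).toNat →
    pvAMid xs pivot i (PySem.List.pyRange b (xs.length : Int) 1) =
      pvBSearch (PySem.Set.ofList xs) pivot i
        (((((PySem.List.enumerate (xs.drop b.toNat) b).flatMap (fun p => pvRowOccs p.1 p.2)).filter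
            (fun t => t.1 == last)).map (fun t => t.2))) := by
  intro d
  induction d with
  | zero =>
    intro b hb hd
    rw [PySem.List.pyRange_one_eq_nil (by omega),
      List.drop_eq_nil_of_le (by omega : xs.length ≤ b.toNat)]
    simp [pvAMid, pvBSearch, PySem.List.enumerate]
  | succ d ih =>
    intro b hb hd
    have hlt : b < (xs.length : Int) := by omega
    have hbn : b.toNat < xs.length := by omega
    rw [PySem.List.pyRange_one_cons hlt, List.drop_eq_getElem_cons hbn,
      PySem.List.enumerate_cons, List.flatMap_cons, List.filter_append, List.map_append,
      pvBSearch_append]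
    have hb1 : (b + 1).toNat = b.toNat + 1 := by omega
    have hrest := ih (b + 1) (by omega) (by omega)
    rw [hb1] at hrest
    by_cases hib : i = b
    · have hskip : pvBSearch (PySem.Set.ofList xs) pivot i
          (((pvRowOccs (b, xs[b.toNat]).1 (b, xs[b.toNat]).2).filter
            (fun t => t.1 == last)).map (fun t => t.2)) = none := by
        apply pvBSearch_skip
        intro p hp
        simp only [pvRowOccs, List.mem_map, List.mem_filter] at hp
        obtain ⟨t, ⟨⟨j, _, ht⟩, _⟩, hpt⟩ := hp
        rw [← hpt, ← ht]
        exact hib.symm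
      rw [hskip]
      simp only [pvAMid, if_pos hib]
      exact hrest
    · simp only [pvAMid, if_neg hib]
      have hrow : PySem.List.pyGetD xs b [] = xs[b.toNat] :=
        PySem.List.pyGetD_eq_getElem xs [] hb (by exact_mod_cast hlt)
      rw [hrow]
      rw [pvInner_eq xs pivot xs[b.toNat] i b last hlast (fun h => hib h.symm)
        ((xs[b.toNat].length : Int) - 0).toNat 0 le_rfl rfl]
      simp only [pvRowOccs]
      cases pvBSearch (PySem.Set.ofList xs) pivot i
          ((((PySem.List.pyRange 0 ((xs[b.toNat].length : Int) - 1) 1).map (fun j =>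
            (PySem.List.pyGetD xs[b.toNat] j 0, b, PySem.List.pyGetD xs[b.toNat] (j + 1) 0))).filter
            (fun t => t.1 == last)).map (fun t => t.2)) with
      | some c => rfl
      | none => exact hrest

lemma pvIndex_getD (xs : List (List Int)) (last : Int) :
    (pvBIndex xs).getD last [] =
      (((pvBOccs xs).filter (fun t => t.1 == last)).map (fun t => t.2)) := by
  unfold pvBIndex
  rw [PySem.Dict.getD_foldl_modify_append]
  simp

lemma pvOuter_eq (xs : List (List Int)) (hpre : Pre_retezeni_letu_v2 xs) :
    ∀ (d : Nat) (b : Int), 0 ≤ b → d = ((xs.length : Int) - b).toNat →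
    pvAOuter xs (PySem.List.pyRange b (xs.length : Int) 1) =
      pvBOuter (PySem.Set.ofList xs) (pvBIndex xs) (PySem.List.enumerate (xs.drop b.toNat) b) := by
  intro d
  induction d with
  | zero =>
    intro b hb hd
    rw [PySem.List.pyRange_one_eq_nil (by omega),
      List.drop_eq_nil_of_le (by omega : xs.length ≤ b.toNat)]
    simp [pvAOuter, pvBOuter, PySem.List.enumerate]
  | succ d ih =>
    intro b hb hd
    have hlt : b < (xs.length : Int) := by omega
    have hbn : b.toNat < xs.length := by omega
    rw [PySem.List.pyRange_one_cons hlt, List.drop_eq_getElem_cons hbn,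
      PySem.List.enumerate_cons]
    have hrow_ne : xs[b.toNat] ≠ [] := hpre _ (List.getElem_mem hbn)
    have hlastget : PySem.List.pyGet? xs[b.toNat] (-1) =
        some (xs[b.toNat].getLast hrow_ne) := by
      rw [PySem.List.pyGet?_neg_one, List.getLast?_eq_some_getLast hrow_ne]
    have hrow : PySem.List.pyGetD xs b [] = xs[b.toNat] :=
      PySem.List.pyGetD_eq_getElem xs [] hb (by exact_mod_cast hlt)
    have hmid := pvMid_eq xs xs[b.toNat] b (xs[b.toNat].getLast hrow_ne)
      (PySem.List.pyGetD_neg_one xs[b.toNat] 0 hrow_ne)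
      ((xs.length : Int) - 0).toNat 0 le_rfl rfl
    simp only [Int.toNat_zero, List.drop_zero] at hmid
    simp only [pvAOuter, pvBOuter, hlastget, hrow, pvIndex_getD, pvBOccs]
    simp only [pvRowOccs] at hmid
    rw [hmid]
    have hb1 : (b + 1).toNat = b.toNat + 1 := by omega
    have hrest := ih (b + 1) (by omega) (by omega)
    rw [hb1] at hrest
    cases pvBSearch (PySem.Set.ofList xs) xs[b.toNat] b
        ((((PySem.List.enumerate xs 0).flatMap (fun p =>
          (PySem.List.pyRange 0 ((p.2.length : Int) - 1) 1).map (fun j =>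
            (PySem.List.pyGetD p.2 j 0, p.1, PySem.List.pyGetD p.2 (j + 1) 0)))).filter
          (fun t => t.1 == xs[b.toNat].getLast hrow_ne)).map (fun t => t.2)) with
    | some c => rfl
    | none => exact hrest

-- ===== VERDICT (by name: the statement is the Claim_ definition above) =====
theorem retezeni_letu_v2_spec : Claim_equal_retezeni_letu_v2 := by
  intro xs _ hpre
  unfold Spec_retezeni_letu_v2 retezeni_letu_v2 retezeni_letu_v2_alt
  simpa using pvOuter_eq xs hpre ((xs.length : Int) - 0).toNat 0 le_rfl rfl
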